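-- pv_equiv track=rewrite | github.com/riffsircar/Zelda-Metroid-CVAE | generate-cvae.py | get_label_met
-- ===== SOURCE A (Python) =====
-- def get_label_met(chunk):
--     label = [False] * 5 # +, B, D, E, ^
--     chunk_string = ''
--     for l in chunk:
--         chunk_string += ''.join(l)
--     if '+' in chunk_string:
--         label[0] = True
--     if 'B' in chunk_string:
--         label[1] = True
--     if 'D' in chunk_string:
--         label[2] = True
--     if 'E' in chunk_string:
--         label[3] = True
--     if '^' in chunk_string:
--         label[4] = True
--     return label
-- ===== SOURCE B (Python) =====
-- _TARGETS = '+BDE^'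
--
-- def get_label_met(chunk):
--     flags = [False] * 5
--     for row in chunk:
--         for cell in row:
--             for ch in cell:
--                 i = _TARGETS.find(ch)
--                 if i != -1:
--                     flags[i] = True
--     return flags
-- ===== Notes on version B (the rewrite author's own statement) =====
-- stated objective: alternative
-- what changed: A concatenates all cells into one string and then scans it five times, once per target character; B never builds the string: it makes a single stateful pass over every character, mapping each character to its target index with an inverse lookup ('+BDE^'.find) and setting that flag in a 5-flag accumulator.
import Mathlib
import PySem

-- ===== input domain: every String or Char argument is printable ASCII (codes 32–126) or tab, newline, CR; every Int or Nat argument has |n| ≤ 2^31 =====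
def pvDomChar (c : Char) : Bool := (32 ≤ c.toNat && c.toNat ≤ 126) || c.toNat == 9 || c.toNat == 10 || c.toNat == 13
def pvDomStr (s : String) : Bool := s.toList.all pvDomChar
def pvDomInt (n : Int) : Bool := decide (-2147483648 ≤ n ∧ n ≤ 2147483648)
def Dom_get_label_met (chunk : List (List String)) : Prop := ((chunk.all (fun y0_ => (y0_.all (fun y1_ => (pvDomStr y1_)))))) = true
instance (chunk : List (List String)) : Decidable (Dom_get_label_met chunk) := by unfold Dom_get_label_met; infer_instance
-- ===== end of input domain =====

-- B replaces A's concatenate-then-scan-five-times strategy with a single stateful pass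
-- over every character, using an inverse lookup ('+BDE^'.find ch) to set the matching
-- flag in a 5-flag accumulator (same cost, a different traversal).


-- ===== PORT A =====
-- Literal port of A: concatenate all cells into one character string via the same
-- left fold, then five substring tests; 'c in s' for a single-char c is exactly
-- character membership (List.contains), which is exact here.
def get_label_met (chunk : List (List String)) : List Bool :=
  let chunk_string : List Char :=
    chunk.foldl (fun acc l => acc ++ PySem.Chars.join [] (l.map String.toList)) []
  let label : List Bool := [false, false, false, false, false]
  let label := if chunk_string.contains '+' then label.set 0 true else label
  let label := if chunk_string.contains 'B' then label.set 1 true else label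
  let label := if chunk_string.contains 'D' then label.set 2 true else label
  let label := if chunk_string.contains 'E' then label.set 3 true else label
  let label := if chunk_string.contains '^' then label.set 4 true else label
  label

-- ===== PORT B =====
-- B: one pass over every character; each character is mapped to its target index
-- with _TARGETS.find and the corresponding flag is set in the accumulator.
-- (_TARGETS.find(ch) on the one-character string ch is Chars.find on [ch]; exact.)
def altUpdate (flags : List Bool) (ch : Char) : List Bool :=
  let i := PySem.Chars.find "+BDE^".toList [ch]
  if i != -1 then flags.set i.toNat true else flags

def get_label_met_alt (chunk : List (List String)) : List Bool :=
  chunk.foldl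
    (fun flags row => row.foldl (fun fl cell => cell.toList.foldl altUpdate fl) flags)
    [false, false, false, false, false]

-- ===== PRECONDITION & SPEC =====
def Spec_get_label_met (chunk : List (List String)) (out : List Bool) : Prop := out = get_label_met_alt chunk
instance (chunk : List (List String)) (out : List Bool) : Decidable (Spec_get_label_met chunk out) := by unfold Spec_get_label_met; infer_instance

-- ===== CLAIM =====
def Claim_equal_get_label_met : Prop := ∀ (chunk : List (List String)), Dom_get_label_met chunk → Spec_get_label_met chunk (get_label_met chunk)

-- ===== LEMMAS AND PROOFS =====
theorem altUpdate_eq (f0 f1 f2 f3 f4 : Bool) (ch : Char) :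
    altUpdate [f0, f1, f2, f3, f4] ch =
      [f0 || ('+' == ch), f1 || ('B' == ch), f2 || ('D' == ch), f3 || ('E' == ch), f4 || ('^' == ch)] := by
  by_cases h1 : ch = '+'
  · subst h1; simp [altUpdate, show PySem.Chars.find ['+','B','D','E','^'] ['+'] = (0 : Int) from by decide]
  by_cases h2 : ch = 'B'
  · subst h2; simp [altUpdate, show PySem.Chars.find ['+','B','D','E','^'] ['B'] = (1 : Int) from by decide]
  by_cases h3 : ch = 'D'
  · subst h3; simp [altUpdate, show PySem.Chars.find ['+','B','D','E','^'] ['D'] = (2 : Int) from by decide]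
  by_cases h4 : ch = 'E'
  · subst h4; simp [altUpdate, show PySem.Chars.find ['+','B','D','E','^'] ['E'] = (3 : Int) from by decide]
  by_cases h5 : ch = '^'
  · subst h5; simp [altUpdate, show PySem.Chars.find ['+','B','D','E','^'] ['^'] = (4 : Int) from by decide]
  have hfind : PySem.Chars.find ['+','B','D','E','^'] [ch] = -1 := by
    rw [PySem.Chars.find_eq_neg_one_iff]
    intro h
    have : ch ∈ ['+','B','D','E','^'] := h.mem (by simp)
    simp at this
    rcases this with h | h | h | h | h <;> simp_all
  simp [altUpdate, hfind, Ne.symm h1, Ne.symm h2, Ne.symm h3, Ne.symm h4, Ne.symm h5]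

theorem foldl_altUpdate_chars (cs : List Char) (f0 f1 f2 f3 f4 : Bool) :
    cs.foldl altUpdate [f0, f1, f2, f3, f4] =
      [f0 || cs.contains '+', f1 || cs.contains 'B', f2 || cs.contains 'D',
       f3 || cs.contains 'E', f4 || cs.contains '^'] := by
  induction cs generalizing f0 f1 f2 f3 f4 with
  | nil => simp
  | cons c cs ih =>
    simp only [List.foldl_cons, altUpdate_eq, ih, List.contains_cons]
    simp [Bool.or_assoc]

theorem foldl_altUpdate_row (row : List String) (f0 f1 f2 f3 f4 : Bool) :
    row.foldl (fun fl cell => cell.toList.foldl altUpdate fl) [f0, f1, f2, f3, f4] =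
      [f0 || (row.flatMap String.toList).contains '+',
       f1 || (row.flatMap String.toList).contains 'B',
       f2 || (row.flatMap String.toList).contains 'D',
       f3 || (row.flatMap String.toList).contains 'E',
       f4 || (row.flatMap String.toList).contains '^'] := by
  induction row generalizing f0 f1 f2 f3 f4 with
  | nil => simp
  | cons c cs ih =>
    simp only [List.foldl_cons, foldl_altUpdate_chars, ih, List.flatMap_cons]
    simp [Bool.or_assoc]

theorem alt_eq_contains (chunk : List (List String)) :
    get_label_met_alt chunk =
      [(chunk.flatMap (fun row => row.flatMap String.toList)).contains '+',
       (chunk.flatMap (fun row => row.flatMap String.toList)).contains 'B',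
       (chunk.flatMap (fun row => row.flatMap String.toList)).contains 'D',
       (chunk.flatMap (fun row => row.flatMap String.toList)).contains 'E',
       (chunk.flatMap (fun row => row.flatMap String.toList)).contains '^'] := by
  unfold get_label_met_alt
  have main : ∀ (ch : List (List String)) (f0 f1 f2 f3 f4 : Bool),
      ch.foldl (fun flags row => row.foldl (fun fl cell => cell.toList.foldl altUpdate fl) flags)
          [f0, f1, f2, f3, f4] =
        [f0 || (ch.flatMap (fun row => row.flatMap String.toList)).contains '+',
         f1 || (ch.flatMap (fun row => row.flatMap String.toList)).contains 'B',
         f2 || (ch.flatMap (fun row => row.flatMap String.toList)).contains 'D',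
         f3 || (ch.flatMap (fun row => row.flatMap String.toList)).contains 'E',
         f4 || (ch.flatMap (fun row => row.flatMap String.toList)).contains '^'] := by
    intro ch
    induction ch with
    | nil => intro f0 f1 f2 f3 f4; simp
    | cons r rs ih =>
      intro f0 f1 f2 f3 f4
      simp only [List.foldl_cons, foldl_altUpdate_row, ih, List.flatMap_cons]
      simp [Bool.or_assoc]
  simpa using main chunk false false false false false

theorem chars_join_nil_eq_flatten (ls : List (List Char)) :
    PySem.Chars.join [] ls = ls.flatten := by
  induction ls with
  | nil => exact PySem.Chars.join_nil []
  | cons x xs ih =>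
    cases xs with
    | nil => simp [PySem.Chars.join_singleton]
    | cons y ys => rw [PySem.Chars.join_cons_cons]; simp [ih]

theorem foldl_append_join (chunk : List (List String)) (acc : List Char) :
    chunk.foldl (fun a l => a ++ PySem.Chars.join [] (l.map String.toList)) acc
      = acc ++ chunk.flatMap (fun row => row.flatMap String.toList) := by
  induction chunk generalizing acc with
  | nil => simp
  | cons r rs ih =>
    simp [List.foldl, ih, chars_join_nil_eq_flatten, List.flatMap_def, List.append_assoc]

-- ===== VERDICT =====
theorem get_label_met_spec : Claim_equal_get_label_met := by
  intro chunk _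
  unfold Spec_get_label_met
  rw [alt_eq_contains]
  unfold get_label_met
  simp only [foldl_append_join, List.nil_append]
  generalize (chunk.flatMap fun row => row.flatMap String.toList) = cs
  rcases h1 : cs.contains '+' <;> rcases h2 : cs.contains 'B' <;> rcases h3 : cs.contains 'D' <;>
    rcases h4 : cs.contains 'E' <;> rcases h5 : cs.contains '^' <;>
    simp [h1, h2, h3, h4, h5, List.set]
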